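-- pv_equiv track=rewrite | github.com/benbuzz790/bots | bots/tools/python_edit.py | _find_string_end_in_source
-- ===== SOURCE A (Python) =====
-- def _find_string_end_in_source(source, start_pos, quote_char):
--     if start_pos >= len(source):
--         return -1
--     pos = start_pos + 1
--     while pos < len(source):
--         if source[pos] == chr(92) and pos + 1 < len(source):
--             pos += 2
--         elif source[pos] == quote_char:
--             return pos
--         else:
--             pos += 1
--     return -1
-- ===== SOURCE B (Python) =====
-- def _find_string_end_in_source(source, start_pos, quote_char):
--     if start_pos >= len(source):
--         return -1
--     pos = start_pos + 1
--     while pos < len(source):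
--         if source[pos] == quote_char:
--             # candidate terminator: it counts iff the run of backslashes
--             # immediately before it (within the scanned region) has even length
--             k = pos
--             while k - 1 >= start_pos + 1 and source[k - 1] == chr(92):
--                 k -= 1
--             if (pos - k) % 2 == 0:
--                 return pos
--         pos += 1
--     return -1
-- ===== Notes on version B (the rewrite author's own statement) =====
-- stated objective: alternative
-- what changed: Instead of A's stateful escape-skipping scan (pos += 2 over a backslash pair), B searches for candidate occurrences of quote_char and accepts a candidate iff the run of backslashes immediately preceding it (within the scanned region) has even length.
-- outside the precondition, e.g. on _find_string_end_in_source('\\\\\\', 0, '\\'): A returns -1, B returns 1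
import Mathlib
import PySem

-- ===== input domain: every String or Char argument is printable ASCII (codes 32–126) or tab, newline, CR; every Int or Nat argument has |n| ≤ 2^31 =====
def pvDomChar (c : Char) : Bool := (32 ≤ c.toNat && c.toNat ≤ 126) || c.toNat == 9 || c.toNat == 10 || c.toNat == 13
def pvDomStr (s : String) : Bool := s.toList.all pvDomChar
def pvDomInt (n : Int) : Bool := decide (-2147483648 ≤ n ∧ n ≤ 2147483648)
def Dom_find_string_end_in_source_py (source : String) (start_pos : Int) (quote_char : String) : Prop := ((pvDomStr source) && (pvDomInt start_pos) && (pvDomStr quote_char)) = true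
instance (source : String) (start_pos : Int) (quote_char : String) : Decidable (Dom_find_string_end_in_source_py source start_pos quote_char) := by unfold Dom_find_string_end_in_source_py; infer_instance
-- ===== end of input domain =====

-- ===== PORT A =====
-- B replaces A's stateful escape-skipping scan (pos += 2 over a backslash pair) with a
-- candidate search: each occurrence of quote_char is accepted iff the backslash run
-- immediately before it has even length; objective: alternative algorithm, same cost class.
-- A's loop: backslash-with-successor jumps 2, quote returns pos, else +1.
-- The `none` branch of pyGet? (Python IndexError, excluded by Pre_) returns 0.
def findA_loop (src : List Char) (q : String) (pos : Int) : Int :=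
  if pos < (src.length : Int) then
    match PySem.List.pyGet? src pos with
    | none => 0
    | some c =>
      if c = '\\' ∧ pos + 1 < (src.length : Int) then findA_loop src q (pos + 2)
      else if String.mk [c] = q then pos
      else findA_loop src q (pos + 1)
  else -1
termination_by ((src.length : Int) - pos).toNat
decreasing_by all_goals omega

def find_string_end_in_source_py (source : String) (start_pos : Int) (quote_char : String) : Int :=
  if start_pos ≥ (source.toList.length : Int) then -1
  else findA_loop source.toList quote_char (start_pos + 1)

-- ===== PORT B =====
-- B's inner loop: walk k back over the backslash run ending just before the candidate,
-- never before s = start_pos + 1.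
def findB_run (src : List Char) (s k : Int) : Int :=
  if s ≤ k - 1 ∧ PySem.List.pyGet? src (k - 1) = some '\\' then findB_run src s (k - 1)
  else k
termination_by (k - s).toNat
decreasing_by omega

-- B's outer loop: scan for occurrences of quote_char; accept one iff its preceding
-- backslash run has even length.  The `none` branch mirrors Python's IndexError (excluded by Pre_).
def findB_loop (src : List Char) (q : String) (s pos : Int) : Int :=
  if pos < (src.length : Int) then
    match PySem.List.pyGet? src pos with
    | none => 0
    | some c =>
      if String.mk [c] = q then
        if (pos - findB_run src s pos) % 2 = 0 then pos
        else findB_loop src q s (pos + 1)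
      else findB_loop src q s (pos + 1)
  else -1
termination_by ((src.length : Int) - pos).toNat
decreasing_by all_goals omega

def find_string_end_in_source_py_alt (source : String) (start_pos : Int) (quote_char : String) : Int :=
  if start_pos ≥ (source.toList.length : Int) then -1
  else findB_loop source.toList quote_char (start_pos + 1) (start_pos + 1)

-- ===== PRECONDITION & SPEC =====
-- Pre_ excludes (a) start_pos + 1 < -len(source), where Python's negative indexing makes
-- both programs raise IndexError, and (b) quote_char = "\\", a backslash used as the quote
-- character, on which A's escape-skip branch and quote test overlap and its result is an
-- artefact of the branch order (both values defensible, nobody would specify either).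
def Pre_find_string_end_in_source_py (source : String) (start_pos : Int) (quote_char : String) : Prop :=
  quote_char ≠ "\\" ∧ -(source.toList.length : Int) ≤ start_pos + 1
instance (source : String) (start_pos : Int) (quote_char : String) : Decidable (Pre_find_string_end_in_source_py source start_pos quote_char) := by unfold Pre_find_string_end_in_source_py; infer_instance

def pvWitness_find_string_end_in_source_py : String × Int × String := ("ab\\'c'", 0, "'")

def Spec_find_string_end_in_source_py (source : String) (start_pos : Int) (quote_char : String) (out : Int) : Prop := out = find_string_end_in_source_py_alt source start_pos quote_char
instance (source : String) (start_pos : Int) (quote_char : String) (out : Int) : Decidable (Spec_find_string_end_in_source_py source start_pos quote_char out) := by unfold Spec_find_string_end_in_source_py; infer_instance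

-- ===== CLAIM (what is proved, stated in full; the proofs are below) =====
def Claim_equal_find_string_end_in_source_py : Prop := ∀ (source : String) (start_pos : Int) (quote_char : String), Dom_find_string_end_in_source_py source start_pos quote_char → Pre_find_string_end_in_source_py source start_pos quote_char → Spec_find_string_end_in_source_py source start_pos quote_char (find_string_end_in_source_py source start_pos quote_char)

-- ===== LEMMAS AND PROOFS =====

lemma pyGet?_some_of (src : List Char) (pos : Int)
    (h1 : -(src.length : Int) ≤ pos) (h2 : pos < (src.length : Int)) :
    ∃ c, PySem.List.pyGet? src pos = some c := by
  cases hg : PySem.List.pyGet? src pos with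
  | some c => exact ⟨c, rfl⟩
  | none =>
    rw [PySem.List.pyGet?_eq_none_iff] at hg
    exact absurd ⟨h1, h2⟩ hg

lemma run_step (src : List Char) (s pos : Int)
    (h : s ≤ pos ∧ PySem.List.pyGet? src pos = some '\\') :
    findB_run src s (pos + 1) = findB_run src s pos := by
  rw [findB_run]
  simp only [add_sub_cancel_right]
  rw [if_pos h]

lemma run_stop (src : List Char) (s pos : Int)
    (h : ¬ (s ≤ pos ∧ PySem.List.pyGet? src pos = some '\\')) :
    findB_run src s (pos + 1) = pos + 1 := by
  rw [findB_run]
  simp only [add_sub_cancel_right]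
  rw [if_neg h]

lemma run_base (src : List Char) (s : Int) : findB_run src s s = s := by
  rw [findB_run]
  rw [if_neg (by intro h; omega)]

-- Main invariant: whenever the backslash run ending just before pos (clipped at s) has even
-- length — true at every position A's scan can land on — the two loops agree.
lemma main_loop (src : List Char) (q : String) (hq : q ≠ "\\") (s : Int)
    (hs : -(src.length : Int) ≤ s) :
    ∀ m : Nat, ∀ pos : Int, ((src.length : Int) - pos).toNat = m → s ≤ pos →
      (pos - findB_run src s pos) % 2 = 0 →
      findA_loop src q pos = findB_loop src q s pos := by
  intro m
  induction m using Nat.strong_induction_on with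
  | _ m ih =>
    intro pos hm hsp hpar
    by_cases hlt : pos < (src.length : Int)
    · obtain ⟨c, hget⟩ := pyGet?_some_of src pos (by omega) hlt
      rw [findA_loop, findB_loop, if_pos hlt, if_pos hlt, hget]
      simp only []
      by_cases hbs : c = '\\' ∧ pos + 1 < (src.length : Int)
      · -- A jumps two; B examines pos+1 and (if it is a quote) rejects it by odd parity
        rw [if_pos hbs]
        obtain ⟨hc, hnext⟩ := hbs
        subst hc
        have hcq : ¬ String.mk ['\\'] = q := fun h => hq h.symm
        rw [if_neg hcq]
        -- run facts at pos+1 and pos+2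
        have hr1 : findB_run src s (pos + 1) = findB_run src s pos :=
          run_step src s pos ⟨hsp, hget⟩
        obtain ⟨c2, hget2⟩ := pyGet?_some_of src (pos + 1) (by omega) hnext
        have hpar2 : (pos + 2 - findB_run src s (pos + 2)) % 2 = 0 := by
          by_cases hb2 : c2 = '\\'
          · have : findB_run src s (pos + 1 + 1) = findB_run src s (pos + 1) :=
              run_step src s (pos + 1) ⟨by omega, by rw [hget2, hb2]⟩
            rw [show pos + 2 = pos + 1 + 1 by ring, this, hr1]
            omega
          · have : findB_run src s (pos + 1 + 1) = pos + 1 + 1 :=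
              run_stop src s (pos + 1) (by
                intro ⟨_, h2⟩; rw [hget2] at h2; exact hb2 (Option.some.injEq _ _ ▸ h2))
            rw [show pos + 2 = pos + 1 + 1 by ring, this]
            omega
        have hA2 : findA_loop src q (pos + 2) = findB_loop src q s (pos + 2) :=
          ih (((src.length : Int) - (pos + 2)).toNat) (by omega) (pos + 2) rfl (by omega) hpar2
        -- B at pos+1
        rw [findB_loop, if_pos hnext, hget2]
        simp only []
        by_cases hq2 : String.mk [c2] = q
        · rw [if_pos hq2]
          have hparodd : ¬ (pos + 1 - findB_run src s (pos + 1)) % 2 = 0 := by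
            rw [hr1]; omega
          rw [if_neg hparodd]
          rw [show pos + 1 + 1 = pos + 2 by ring]
          exact hA2
        · rw [if_neg hq2]
          rw [show pos + 1 + 1 = pos + 2 by ring]
          exact hA2
      · by_cases hqm : String.mk [c] = q
        · -- A returns pos; B accepts the candidate by the even-parity hypothesis
          rw [if_neg hbs, if_pos hqm, if_pos hqm, if_pos hpar]
        · rw [if_neg hbs, if_neg hqm, if_neg hqm]
          by_cases hc : c = '\\'
          · -- trailing backslash: pos+1 ≥ len, both loops end with -1
            have hend : ¬ pos + 1 < (src.length : Int) := fun h => hbs ⟨hc, h⟩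
            rw [findA_loop, if_neg hend, findB_loop, if_neg hend]
          · have hpar1 : (pos + 1 - findB_run src s (pos + 1)) % 2 = 0 := by
              rw [run_stop src s pos (by
                intro ⟨_, h2⟩; rw [hget] at h2; exact hc (Option.some.injEq _ _ ▸ h2))]
              omega
            exact ih (((src.length : Int) - (pos + 1)).toNat) (by omega) (pos + 1) rfl
              (by omega) hpar1
    · rw [findA_loop, if_neg hlt, findB_loop, if_neg hlt]

-- ===== VERDICT (by name: the statement is the Claim_ definition above) =====
theorem find_string_end_in_source_py_spec : Claim_equal_find_string_end_in_source_py := by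
  intro source start_pos quote_char _ hpre
  unfold Spec_find_string_end_in_source_py
  unfold find_string_end_in_source_py find_string_end_in_source_py_alt
  split_ifs with h
  · rfl
  · have hs : -(source.toList.length : Int) ≤ start_pos + 1 := hpre.2
    have hpar : (start_pos + 1 - findB_run source.toList (start_pos + 1) (start_pos + 1)) % 2 = 0 := by
      rw [run_base]; omega
    exact main_loop source.toList quote_char hpre.1 (start_pos + 1) hs
      (((source.toList.length : Int) - (start_pos + 1)).toNat) (start_pos + 1) rfl le_rfl hpar
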